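-- pv_equiv track=rewrite | github.com/pkletsko/py-education | algorithms/combinatorics/main/subarray/recursion/generate_all_paths_root_to_leaf.py | generate_all_paths_root_to_leaf
-- ===== SOURCE A (Python) =====
-- def generate_all_paths_root_to_leaf(start, nums, path, res):
--     LEAF_NODE: int = len(nums)
--     # termination condition
--     if start == LEAF_NODE:
--         # collecting results
--         s = [str(i) for i in path]
--         res.append("->".join(s))
--
--     for index in range(start, LEAF_NODE):
--         # add value to recursion state
--         path.append(nums[index])
--         # recursion call
--         generate_all_paths_root_to_leaf(index + 1, nums, path, res)
--         # remove value from recursion state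
--         path.pop()
--     return res
-- ===== SOURCE B (Python) =====
-- def generate_all_paths_root_to_leaf(start, nums, path, res):
--     # Bottom-up DP: build, right-to-left, the list of index-subsequences that
--     # end at the last element, then render them all at once.
--     n = len(nums)
--     if start > n:
--         return res
--     tails = [[]]
--     for s in range(n - 1, start - 1, -1):
--         new_tails = [[nums[s]] + t for t in tails]
--         if s != n - 1:
--             new_tails += tails
--         tails = new_tails
--     res.extend("->".join(str(x) for x in path + t) for t in tails)
--     return res
-- ===== Notes on version B (the rewrite author's own statement) =====
-- stated objective: alternative
-- what changed: Replaces A's backtracking recursion (append/recurse/pop over a shared path) by an iterative right-to-left dynamic programme that builds the table of tail subsequences ending at the last element with a single fold, then renders all result strings at once.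
import Mathlib
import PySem

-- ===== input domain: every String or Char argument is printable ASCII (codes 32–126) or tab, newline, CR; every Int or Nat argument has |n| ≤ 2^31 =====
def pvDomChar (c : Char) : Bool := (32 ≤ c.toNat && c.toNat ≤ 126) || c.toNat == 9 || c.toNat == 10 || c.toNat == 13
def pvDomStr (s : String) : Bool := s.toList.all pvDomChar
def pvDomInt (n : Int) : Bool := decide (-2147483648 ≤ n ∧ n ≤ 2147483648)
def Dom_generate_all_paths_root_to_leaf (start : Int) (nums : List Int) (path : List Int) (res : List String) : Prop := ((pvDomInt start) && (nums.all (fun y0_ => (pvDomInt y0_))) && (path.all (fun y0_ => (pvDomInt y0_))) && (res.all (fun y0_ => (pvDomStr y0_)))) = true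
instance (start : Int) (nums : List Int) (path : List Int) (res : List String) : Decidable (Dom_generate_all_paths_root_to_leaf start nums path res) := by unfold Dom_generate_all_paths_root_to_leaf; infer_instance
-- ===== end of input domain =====

-- B replaces A's backtracking recursion by an iterative right-to-left dynamic programme over tail
-- subsequences (objective: alternative decomposition, similar cost; equivalence is about the return
-- value — both A and B also append the same strings to the caller's `res` list in Python).

-- ===== PORT A =====
-- literal transliteration of A's recursion; nums[index] is PySem.List.pyGetD (in range under Pre_)
def generate_all_paths_root_to_leaf (start : Int) (nums : List Int) (path : List Int) (res : List String) : List String :=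
  let res1 : List String :=
    if start = (nums.length : Int) then
      res ++ [PySem.Str.join "->" (path.map PySem.Int.toStr)]
    else res
  (PySem.List.pyRange start (nums.length : Int) 1).attach.foldl
    (fun r x =>
      generate_all_paths_root_to_leaf (x.1 + 1) nums (path ++ [PySem.List.pyGetD nums x.1 0]) r)
    res1
termination_by ((nums.length : Int) - start).toNat
decreasing_by
  have h := PySem.List.mem_pyRange_one.mp x.2
  omega

-- ===== PORT B =====
-- literal transliteration of B (Source B): right-to-left fold building the tail-subsequence table
def generate_all_paths_root_to_leaf_alt (start : Int) (nums : List Int) (path : List Int) (res : List String) : List String :=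
  let n : Int := nums.length
  if start > n then res
  else
    let tails : List (List Int) :=
      (PySem.List.pyRange (n - 1) (start - 1) (-1)).foldl
        (fun tails s =>
          let newTails := tails.map (fun t => PySem.List.pyGetD nums s 0 :: t)
          if s ≠ n - 1 then newTails ++ tails else newTails)
        [[]]
    res ++ tails.map (fun t => PySem.Str.join "->" ((path ++ t).map PySem.Int.toStr))

-- ===== PRECONDITION & SPEC =====
-- Pre_ excludes exactly start < -len(nums), where Python A raises IndexError (negative indexing).
def Pre_generate_all_paths_root_to_leaf (start : Int) (nums : List Int) (path : List Int) (res : List String) : Prop :=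
  -(nums.length : Int) ≤ start
instance (start : Int) (nums : List Int) (path : List Int) (res : List String) : Decidable (Pre_generate_all_paths_root_to_leaf start nums path res) := by unfold Pre_generate_all_paths_root_to_leaf; infer_instance

def pvWitness_generate_all_paths_root_to_leaf : Int × List Int × List Int × List String := (0, [1, 2, 3], [], [])

def Spec_generate_all_paths_root_to_leaf (start : Int) (nums : List Int) (path : List Int) (res : List String) (out : List String) : Prop := out = generate_all_paths_root_to_leaf_alt start nums path res
instance (start : Int) (nums : List Int) (path : List Int) (res : List String) (out : List String) : Decidable (Spec_generate_all_paths_root_to_leaf start nums path res out) := by unfold Spec_generate_all_paths_root_to_leaf; infer_instance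

-- ===== CLAIM (what is proved, stated in full; the proofs are below) =====
def Claim_equal_generate_all_paths_root_to_leaf : Prop := ∀ (start : Int) (nums : List Int) (path : List Int) (res : List String), Dom_generate_all_paths_root_to_leaf start nums path res → Pre_generate_all_paths_root_to_leaf start nums path res → Spec_generate_all_paths_root_to_leaf start nums path res (generate_all_paths_root_to_leaf start nums path res)

-- ===== LEMMAS AND PROOFS =====

-- the list of index-subsequences of [s, n) that end at n-1 (plus the empty one when s = n),
-- in A's DFS emission order
def pvSeqs (nums : List Int) (s : Int) : List (List Int) :=
  (if s = (nums.length : Int) then [[]] else []) ++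
  (PySem.List.pyRange s (nums.length : Int) 1).attach.flatMap
    (fun x => (pvSeqs nums (x.1 + 1)).map (fun t => PySem.List.pyGetD nums x.1 0 :: t))
termination_by ((nums.length : Int) - s).toNat
decreasing_by
  have h := PySem.List.mem_pyRange_one.mp x.2
  omega

def pvJoin (p : List Int) : String := PySem.Str.join "->" (p.map PySem.Int.toStr)

lemma pvSeqs_n (nums : List Int) : pvSeqs nums (nums.length : Int) = [[]] := by
  rw [pvSeqs]
  simp [PySem.List.pyRange_one_eq_nil le_rfl]

lemma pvSeqs_gt (nums : List Int) (s : Int) (h : (nums.length : Int) < s) : pvSeqs nums s = [] := by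
  rw [pvSeqs]
  rw [if_neg (by omega : ¬ s = (nums.length : Int)), PySem.List.pyRange_one_eq_nil (le_of_lt h)]
  simp

lemma pvSeqs_flat (nums : List Int) (s : Int) :
    pvSeqs nums s =
      (if s = (nums.length : Int) then [[]] else []) ++
        (PySem.List.pyRange s (nums.length : Int) 1).flatMap
          (fun i => (pvSeqs nums (i + 1)).map (fun t => PySem.List.pyGetD nums i 0 :: t)) := by
  rw [pvSeqs]
  simp

lemma pvSeqs_step (nums : List Int) (s : Int) (h : s < (nums.length : Int)) :
    pvSeqs nums s =
      (pvSeqs nums (s + 1)).map (fun t => PySem.List.pyGetD nums s 0 :: t) ++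
        (if s + 1 = (nums.length : Int) then [] else pvSeqs nums (s + 1)) := by
  rw [pvSeqs_flat, if_neg (by omega : ¬ s = (nums.length : Int)),
    PySem.List.pyRange_one_cons h, List.flatMap_cons, List.nil_append]
  by_cases h1 : s + 1 = (nums.length : Int)
  · rw [if_pos h1,
      (by rw [h1]; exact PySem.List.pyRange_one_eq_nil le_rfl :
        PySem.List.pyRange (s + 1) (nums.length : Int) 1 = [])]
    simp
  · rw [if_neg h1]
    congr 1
    rw [pvSeqs_flat nums (s + 1), if_neg h1, List.nil_append]

lemma A_char (nums : List Int) (s : Int) (path : List Int) (res : List String) :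
    generate_all_paths_root_to_leaf s nums path res =
      res ++ (pvSeqs nums s).map (fun t => pvJoin (path ++ t)) := by
  rw [generate_all_paths_root_to_leaf]
  have hcongr : ∀ (r : List String) (x : {i // i ∈ PySem.List.pyRange s (nums.length : Int) 1}),
      x ∈ (PySem.List.pyRange s (nums.length : Int) 1).attach →
      generate_all_paths_root_to_leaf (x.1 + 1) nums (path ++ [PySem.List.pyGetD nums x.1 0]) r =
        r ++ (pvSeqs nums (x.1 + 1)).map
          (fun t => pvJoin (path ++ (PySem.List.pyGetD nums x.1 0 :: t))) := by
    intro r x _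
    rw [A_char nums (x.1 + 1) (path ++ [PySem.List.pyGetD nums x.1 0]) r]
    congr 1
    congr 1
    funext t
    rw [List.append_assoc]
    rfl
  rw [PySem.List.foldl_congr_mem
    ((PySem.List.pyRange s (nums.length : Int) 1).attach)
    (fun r x => generate_all_paths_root_to_leaf (x.1 + 1) nums
      (path ++ [PySem.List.pyGetD nums x.1 0]) r)
    (fun r x => r ++ (pvSeqs nums (x.1 + 1)).map
      (fun t => pvJoin (path ++ (PySem.List.pyGetD nums x.1 0 :: t))))
    _ hcongr, PySem.List.foldl_append_eq_flatMap]
  rw [pvSeqs_flat, List.map_append, List.map_flatMap]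
  by_cases hs : s = (nums.length : Int)
  · rw [if_pos hs, if_pos hs]
    simp [pvJoin, List.map_map, Function.comp_def]
  · rw [if_neg hs, if_neg hs]
    simp [List.map_map, Function.comp_def]
termination_by ((nums.length : Int) - s).toNat
decreasing_by
  have h := PySem.List.mem_pyRange_one.mp x.2
  omega

lemma B_fold (nums : List Int) (s : Int) (h : s ≤ (nums.length : Int)) :
    (PySem.List.pyRange ((nums.length : Int) - 1) (s - 1) (-1)).foldl
      (fun tails i =>
        let newTails := tails.map (fun t => PySem.List.pyGetD nums i 0 :: t)
        if i ≠ (nums.length : Int) - 1 then newTails ++ tails else newTails)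
      [[]] = pvSeqs nums s := by
  by_cases hs : s = (nums.length : Int)
  · rw [hs, PySem.List.pyRange_neg_one_eq_nil (by omega), List.foldl_nil, pvSeqs_n]
  · have h' : s < (nums.length : Int) := lt_of_le_of_ne h hs
    have hsplit : PySem.List.pyRange ((nums.length : Int) - 1) (s - 1) (-1) =
        PySem.List.pyRange ((nums.length : Int) - 1) s (-1) ++ [s] := by
      rw [PySem.List.pyRange_neg_one_eq_reverse, PySem.List.pyRange_neg_one_eq_reverse,
        (by ring : s - 1 + 1 = s), PySem.List.pyRange_one_cons (by omega : s < (nums.length : Int) - 1 + 1)]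
      simp
    have hrec := B_fold nums (s + 1) (by omega)
    rw [(by ring : s + 1 - 1 = s)] at hrec
    rw [hsplit, List.foldl_append, hrec, List.foldl_cons, List.foldl_nil,
      pvSeqs_step nums s h']
    by_cases he : s = (nums.length : Int) - 1
    · simp [he]
    · have h2 : ¬ s + 1 = (nums.length : Int) := by omega
      simp [he, h2]
termination_by ((nums.length : Int) - s).toNat

-- ===== VERDICT (by name: the statement is the Claim_ definition above) =====
theorem generate_all_paths_root_to_leaf_spec : Claim_equal_generate_all_paths_root_to_leaf := by
  intro start nums path res _ _
  unfold Spec_generate_all_paths_root_to_leaf generate_all_paths_root_to_leaf_alt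
  rw [A_char]
  by_cases hgt : start > (nums.length : Int)
  · simp only [if_pos hgt, pvSeqs_gt nums start hgt]
    simp
  · simp only [if_neg hgt]
    rw [B_fold nums start (not_lt.mp hgt)]
    rfl
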